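-- pv_equiv track=rewrite | github.com/Lucenix/LA2 | treino4/multiplos.py | aux
-- ===== SOURCE A (Python) =====
-- def complete(p,c):
--     return len(c) == p
--
-- def extensions(p,c):
--     return [x for x in range(1, p+1) if x not in c]
--
-- def valid(p,c,d):
--     return int("".join(map(lambda i : str(i), c)))%d==0
--
-- def aux(p,c,d):
--     if complete(p,c) and valid(p,c,d):
--         return 1
--     r = 0
--     for x in extensions(p,c):
--         c.append(x)
--         r += aux(p,c,d)
--         c.pop()
--     return r
-- ===== SOURCE B (Python) =====
-- def aux(p, c, d):
--     k = p - len(c)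
--     if k < 0:
--         return 0
--     avail = [x for x in range(1, p + 1) if x not in c]
--     layer = [("".join(str(i) for i in c), avail)]
--     for _ in range(k):
--         layer = [(s + str(x), rest[:i] + rest[i + 1:])
--                  for (s, rest) in layer
--                  for i, x in enumerate(rest)]
--     return sum(1 for (s, _) in layer if int(s) % d == 0)
-- ===== Notes on version B (the rewrite author's own statement) =====
-- stated objective: alternative
-- what changed: A's mutating depth-first backtracking (re-filtering the extension list and re-joining/re-parsing the whole digit string at every node) is replaced by an iterative breadth-first expansion of (string, remaining-values) layers followed by one counting pass over the final layer.
import Mathlib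
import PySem

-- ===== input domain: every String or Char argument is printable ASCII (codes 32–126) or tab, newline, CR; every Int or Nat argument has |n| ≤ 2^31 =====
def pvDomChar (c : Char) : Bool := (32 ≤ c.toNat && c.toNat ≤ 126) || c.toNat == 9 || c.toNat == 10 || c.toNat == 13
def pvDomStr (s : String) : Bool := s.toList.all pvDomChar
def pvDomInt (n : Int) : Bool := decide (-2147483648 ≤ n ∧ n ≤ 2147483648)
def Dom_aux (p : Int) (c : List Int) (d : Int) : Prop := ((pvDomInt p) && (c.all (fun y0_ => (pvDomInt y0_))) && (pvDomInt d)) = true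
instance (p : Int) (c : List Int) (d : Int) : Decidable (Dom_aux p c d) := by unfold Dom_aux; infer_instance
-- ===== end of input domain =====

-- B replaces A's mutating depth-first backtracking (recursion that re-filters the extension list
-- and re-joins/re-parses the digit string from scratch at each node) by an iterative breadth-first
-- layer expansion over (string, remaining-values) states; objective: alternative.
-- A mutates c in place but restores it before returning (net effect none); B does not touch c.

-- ===== PORT A =====
def completeA (p : Int) (c : List Int) : Bool := (c.length : Int) == p

def extensionsA (p : Int) (c : List Int) : List Int :=
  (PySem.List.pyRange 1 (p + 1) 1).filter (fun x => !(c.contains x))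

-- int("".join(map(str, c))) % d == 0; where Python's int() raises ValueError the match is `none`
-- (those inputs are outside Pre_aux) and the port returns false.
def validA (p : Int) (c : List Int) (d : Int) : Bool :=
  match PySem.Int.ofStr? (PySem.Str.join "" (c.map PySem.Int.toStr)) with
  | some n => PySem.Int.mod n d == 0
  | none => false

-- termination facts for `aux` (cited in its decreasing_by)
theorem extensionsA_append_eq (p x : Int) (c : List Int) :
    extensionsA p (c ++ [x]) = (extensionsA p c).filter (fun y => !(y == x)) := by
  unfold extensionsA
  rw [List.filter_filter]
  apply List.filter_congr
  intro a _
  simp [Bool.and_comm]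
  rfl

theorem extensionsA_append_lt (p x : Int) (c : List Int) (hx : x ∈ extensionsA p c) :
    (extensionsA p (c ++ [x])).length < (extensionsA p c).length := by
  rw [extensionsA_append_eq]
  apply List.length_filter_lt_length_iff_exists.mpr
  exact ⟨x, hx, by simp⟩

def aux (p : Int) (c : List Int) (d : Int) : Int :=
  if completeA p c && validA p c d then 1
  else (extensionsA p c).attach.foldl (fun r y => r + aux p (c ++ [y.1]) d) 0
termination_by (extensionsA p c).length
decreasing_by exact extensionsA_append_lt p y.1 c y.2

-- ===== PORT B =====
-- Python strings are represented at the List Char level (PySem.Chars); Source B's one-layer list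
-- comprehension `[(s + str(x), rest[:i] + rest[i+1:]) for (s, rest) in layer for i, x in enumerate(rest)]`:
def stepB (layer : List (List Char × List Int)) : List (List Char × List Int) :=
  layer.flatMap (fun sr =>
    (PySem.List.enumerate sr.2).map (fun ix =>
      (sr.1 ++ PySem.Int.toChars ix.2,
       PySem.List.slice sr.2 none (some ix.1) ++ PySem.List.slice sr.2 (some (ix.1 + 1)) none)))

def aux_alt (p : Int) (c : List Int) (d : Int) : Int :=
  let k := p - (c.length : Int)
  if k < 0 then 0
  else
    let avail := (PySem.List.pyRange 1 (p + 1) 1).filter (fun x => !(c.contains x))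
    let layer0 : List (List Char × List Int) := [(PySem.Chars.join [] (c.map PySem.Int.toChars), avail)]
    let layer := (List.range k.toNat).foldl (fun L _ => stepB L) layer0
    (layer.map (fun sr =>
      match PySem.Int.ofChars? sr.1 with
      | some n => if PySem.Int.mod n d == 0 then (1 : Int) else 0
      | none => 0)).sum

-- ===== PRECONDITION & SPEC =====
-- Pre_aux excludes exactly the inputs where Python's A raises: with len(c) ≤ p a complete leaf is
-- always reached and parsed, so d = 0 raises ZeroDivisionError, p = 0 with c = [] raises on int(""),
-- and a negative element after the first makes the joined string unparseable (ValueError).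
-- With len(c) > p, A returns 0 without ever parsing or dividing, so nothing is excluded there.
def Pre_aux (p : Int) (c : List Int) (d : Int) : Prop :=
  (p < (c.length : Int)) ∨ (d ≠ 0 ∧ ¬(p = 0 ∧ c = []) ∧ ∀ x ∈ c.tail, 0 ≤ x)
instance (p : Int) (c : List Int) (d : Int) : Decidable (Pre_aux p c d) := by
  unfold Pre_aux; infer_instance

def pvWitness_aux : Int × List Int × Int := (3, [], 7)

def Spec_aux (p : Int) (c : List Int) (d : Int) (out : Int) : Prop := out = aux_alt p c d
instance (p : Int) (c : List Int) (d : Int) (out : Int) : Decidable (Spec_aux p c d out) := by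
  unfold Spec_aux; infer_instance

-- ===== CLAIM (what is proved, stated in full; the proofs are below) =====
def Claim_equal_aux : Prop := ∀ (p : Int) (c : List Int) (d : Int), Dom_aux p c d → Pre_aux p c d → Spec_aux p c d (aux p c d)

-- ===== LEMMAS AND PROOFS =====

-- the per-leaf contribution of a state's string in B's final sum
def leafVal (d : Int) (s : List Char) : Int :=
  match PySem.Int.ofChars? s with
  | some n => if PySem.Int.mod n d == 0 then (1 : Int) else 0
  | none => 0

def layerSum (d : Int) (L : List (List Char × List Int)) : Int :=
  (L.map (fun sr => leafVal d sr.1)).sum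

def expandN (n : Nat) (L : List (List Char × List Int)) : List (List Char × List Int) :=
  (List.range n).foldl (fun L _ => stepB L) L

def J (c : List Int) : List Char := PySem.Chars.join [] (c.map PySem.Int.toChars)

theorem aux_eq (p : Int) (c : List Int) (d : Int) :
    aux p c d = if completeA p c && validA p c d then 1
      else ((extensionsA p c).map (fun x => aux p (c ++ [x]) d)).sum := by
  rw [aux]
  split
  · rfl
  · rw [List.foldl_attach (f := fun r y => r + aux p (c ++ [y]) d), PySem.List.foldl_add]
    simp

theorem aux_long (p : Int) (d : Int) : ∀ (c : List Int), p < (c.length : Int) → aux p c d = 0 := by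
  intro c hc
  induction hn : (extensionsA p c).length using Nat.strong_induction_on generalizing c with
  | _ n ih =>
    subst hn
    rw [aux_eq]
    have hcomp : completeA p c = false := by
      simp [completeA]; omega
    rw [hcomp]
    simp only [Bool.false_and, Bool.false_eq_true, if_false]
    apply List.sum_eq_zero
    intro v hv
    simp only [List.mem_map] at hv
    obtain ⟨x, hx, rfl⟩ := hv
    exact ih _ (extensionsA_append_lt p x c hx) _ (by simp; omega) rfl

theorem expandN_succ' (n : Nat) (L : List (List Char × List Int)) :
    expandN (n + 1) L = stepB (expandN n L) := by
  unfold expandN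
  rw [List.range_succ, List.foldl_append]
  rfl

theorem expandN_succ (n : Nat) (L : List (List Char × List Int)) :
    expandN (n + 1) L = expandN n (stepB L) := by
  induction n generalizing L with
  | zero => rfl
  | succ m ih => rw [expandN_succ', ih, ← expandN_succ']

theorem stepB_append (L1 L2 : List (List Char × List Int)) :
    stepB (L1 ++ L2) = stepB L1 ++ stepB L2 := by
  unfold stepB; rw [List.flatMap_append]

theorem expandN_append (n : Nat) (L1 L2 : List (List Char × List Int)) :
    expandN n (L1 ++ L2) = expandN n L1 ++ expandN n L2 := by
  induction n generalizing L1 L2 with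
  | zero => rfl
  | succ m ih => rw [expandN_succ, expandN_succ, expandN_succ, stepB_append, ih]

theorem filter_ne_getElem : ∀ (l : List Int), l.Nodup → ∀ (k : Nat) (hk : k < l.length),
    l.filter (fun y => !(y == l[k])) = l.take k ++ l.drop (k+1) := by
  intro l
  induction l with
  | nil => intro _ k hk; simp at hk
  | cons a t ih =>
    intro hnd k hk
    rcases k with _ | k
    · simp only [List.getElem_cons_zero, List.filter_cons, List.take_zero, List.drop_succ_cons,
        List.drop_zero, List.nil_append]
      have ha : a ∉ t := (List.nodup_cons.mp hnd).1
      rw [if_neg (by simp)]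
      exact List.filter_eq_self.mpr (fun y hy => by
        simp only [Bool.not_eq_eq_eq_not, Bool.not_true, beq_eq_false_iff_ne]
        intro h; exact ha (h ▸ hy))
    · have hkt : k < t.length := by simpa using hk
      have ha : a ∉ t := (List.nodup_cons.mp hnd).1
      have hne : a ≠ t[k] := fun h => ha (h ▸ t.getElem_mem hkt)
      simp only [List.getElem_cons_succ, List.filter_cons, List.take_succ_cons,
        List.drop_succ_cons]
      rw [if_pos (by simpa using hne)]
      rw [ih (List.nodup_cons.mp hnd).2 k hkt]
      rfl

theorem children_eq (s : List Char) (rest : List Int) (hnd : rest.Nodup) :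
    stepB [(s, rest)] = rest.map (fun x => (s ++ PySem.Int.toChars x,
      rest.filter (fun y => !(y == x)))) := by
  unfold stepB
  simp only [List.flatMap_cons, List.flatMap_nil, List.append_nil]
  apply List.ext_getElem
  · simp [PySem.List.length_enumerate]
  · intro k h1 h2
    simp only [List.getElem_map, PySem.List.getElem_enumerate, List.getElem_map]
    have hk : k < rest.length := by simpa [PySem.List.length_enumerate] using h1
    have e1 : (0 : Int) + (k : Int) = ((k : Nat) : Int) := by omega
    rw [e1, PySem.List.slice_to_natCast]
    have e2 : ((k : Nat) : Int) + 1 = (((k+1 : Nat)) : Int) := by omega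
    rw [e2, PySem.List.slice_from_natCast]
    rw [filter_ne_getElem rest hnd k hk]

theorem join_nil_flatten : ∀ (L : List (List Char)), PySem.Chars.join [] L = L.flatten := by
  intro L
  simp only [PySem.Chars.join, List.intercalate]
  induction L with
  | nil => rfl
  | cons a t ih =>
    cases t with
    | nil => simp
    | cons b u =>
      rw [show List.intersperse ([] : List Char) (a :: b :: u) = a :: [] :: List.intersperse [] (b :: u) from rfl]
      simp only [List.flatten_cons, List.nil_append] at *
      rw [ih]

theorem J_append (c : List Int) (x : Int) :
    J (c ++ [x]) = J c ++ PySem.Int.toChars x := by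
  unfold J
  rw [List.map_append, join_nil_flatten, join_nil_flatten, List.flatten_append]
  simp

theorem leafVal_J (p d : Int) (c : List Int) :
    leafVal d (J c) = if validA p c d then 1 else 0 := by
  have h : PySem.Int.ofStr? (PySem.Str.join "" (c.map PySem.Int.toStr)) = PySem.Int.ofChars? (J c) := by
    rw [PySem.Int.ofStr?.eq_1, PySem.Str.toList_join]
    unfold J
    rw [List.map_map]
    congr 2
    apply List.map_congr_left
    intro y _
    exact PySem.Int.toList_toStr y
  unfold leafVal validA
  rw [h]
  cases PySem.Int.ofChars? (J c) with
  | none => simp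
  | some n => by_cases hm : PySem.Int.mod n d == 0 <;> simp [hm]

theorem layerSum_expand_cons (d : Int) (n : Nat) (st : List Char × List Int)
    (L : List (List Char × List Int)) :
    layerSum d (expandN n (st :: L)) = layerSum d (expandN n [st]) + layerSum d (expandN n L) := by
  rw [show st :: L = [st] ++ L from rfl, expandN_append]
  unfold layerSum
  rw [List.map_append, List.sum_append]

theorem layerSum_expand_map (d : Int) (n : Nat) (f : Int → List Char × List Int) :
    ∀ (l : List Int), layerSum d (expandN n (l.map f)) = (l.map (fun x => layerSum d (expandN n [f x]))).sum := by
  intro l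
  induction l with
  | nil =>
    have : expandN n ([] : List (List Char × List Int)) = [] := by
      induction n with
      | zero => rfl
      | succ m ih => rw [expandN_succ']; rw [ih]; rfl
    simp [this, layerSum]
  | cons a t ih =>
    rw [List.map_cons, layerSum_expand_cons, ih, List.map_cons, List.sum_cons]

theorem extensionsA_nodup (p : Int) (c : List Int) : (extensionsA p c).Nodup :=
  (PySem.List.nodup_pyRange_one 1 (p + 1)).filter _

theorem main_lemma (p d : Int) : ∀ (n : Nat) (c : List Int), (c.length : Int) ≤ p →
    (p - (c.length : Int)).toNat = n →
    aux p c d = layerSum d (expandN n [(J c, extensionsA p c)]) := by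
  intro n
  induction n with
  | zero =>
    intro c hle h0
    have hcomp : completeA p c = true := by simp [completeA]; omega
    have hls : layerSum d (expandN 0 [(J c, extensionsA p c)]) = leafVal d (J c) := by
      simp [expandN, layerSum]
    rw [aux_eq, hcomp, hls, leafVal_J p d c]
    by_cases hv : validA p c d
    · simp [hv]
    · simp only [hv, Bool.and_false, Bool.false_eq_true, if_false]
      apply List.sum_eq_zero
      intro v hv'
      simp only [List.mem_map] at hv'
      obtain ⟨x, _, rfl⟩ := hv'
      exact aux_long p d (c ++ [x]) (by simp; omega)
  | succ m ih =>
    intro c hle hsucc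
    have hlt : (c.length : Int) < p := by omega
    have hcomp : completeA p c = false := by simp [completeA]; omega
    rw [aux_eq, hcomp]
    simp only [Bool.false_and, Bool.false_eq_true, if_false]
    rw [expandN_succ, children_eq (J c) (extensionsA p c) (extensionsA_nodup p c),
      layerSum_expand_map]
    apply congrArg List.sum
    apply List.map_congr_left
    intro x hx
    have h1 : (J c ++ PySem.Int.toChars x, (extensionsA p c).filter (fun y => !(y == x)))
        = (J (c ++ [x]), extensionsA p (c ++ [x])) := by
      rw [J_append, extensionsA_append_eq]
    rw [h1]
    exact ih (c ++ [x]) (by simp; omega) (by simp; omega)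

-- ===== VERDICT (by name: the statement is the Claim_ definition above) =====
theorem aux_spec : Claim_equal_aux := by
  intro p c d _ _
  unfold Spec_aux aux_alt
  by_cases h : p - (c.length : Int) < 0
  · simp only [h, if_true]
    exact aux_long p d c (by omega)
  · simp only [h, if_false]
    have := main_lemma p d (p - (c.length : Int)).toNat c (by omega) rfl
    simpa [layerSum, expandN, leafVal, J, extensionsA] using this
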